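-- pv_equiv track=rewrite | github.com/adisakshya/audiodiff | audiodiff.py | dict_cmp
-- ===== SOURCE A (Python) =====
-- from operator import itemgetter
--
-- def dict_cmp(dict1, dict2):
--     """
--     Compares two dictionary-like objects and returns a tuple. The first
--     item of the tuple is *True* if the two objects have the same set of
--     keys and values, otherwise *False*. The second item is a list
--     of tuples (*sign*, *key*, *value*). *sign* is '-' if the key is present
--     in the first object but not in the second, or the key is present in
--     both objects but the values differ. A '+' sign means the opposite.
--     A ' ' sign means the key and value are present in both objects.
--
--     Examples:
--
--     >>> dict_cmp({'a': 1, 'b': 2, 'c': 3}, {'b': 2, 'c': 5, 'd': 7})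
--     (False, [('-', 'a', 1), (' ', 'b', 2), ('-', 'c', 3), ('+', 'c', 5), ('+', 'd', 7)])
--
--     """
--     keys1 = set(dict1.keys())
--     keys2 = set(dict2.keys())
--     data = []
--     for key in keys1 - keys2:
--         data.append(('-', key, dict1[key]))
--     for key in keys2 - keys1:
--         data.append(('+', key, dict2[key]))
--     for key in keys1 & keys2:
--         if dict1[key] != dict2[key]:
--             data.append(('-', key, dict1[key]))
--             data.append(('+', key, dict2[key]))
--         else:
--             data.append((' ', key, dict1[key]))
--     data.sort(key=itemgetter(1))
--     return not any(t[0] != ' ' for t in data), data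
-- ===== SOURCE B (Python) =====
-- def dict_cmp(dict1, dict2):
--     items1 = sorted(dict1.items(), key=lambda kv: kv[0])
--     items2 = sorted(dict2.items(), key=lambda kv: kv[0])
--     data = []
--     i = j = 0
--     while i < len(items1) and j < len(items2):
--         k1, v1 = items1[i]
--         k2, v2 = items2[j]
--         if k1 < k2:
--             data.append(('-', k1, v1))
--             i += 1
--         elif k2 < k1:
--             data.append(('+', k2, v2))
--             j += 1
--         else:
--             if v1 == v2:
--                 data.append((' ', k1, v1))
--             else:
--                 data.append(('-', k1, v1))
--                 data.append(('+', k2, v2))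
--             i += 1
--             j += 1
--     while i < len(items1):
--         k1, v1 = items1[i]
--         data.append(('-', k1, v1))
--         i += 1
--     while j < len(items2):
--         k2, v2 = items2[j]
--         data.append(('+', k2, v2))
--         j += 1
--     return all(t[0] == ' ' for t in data), data
-- ===== Notes on version B (the rewrite author's own statement) =====
-- stated objective: alternative
-- what changed: A partitions the keys with three set operations, looks every key up in the dicts and stable-sorts the assembled tuple list; B is a sorted-merge join: it sorts the two item lists once and walks them with two pointers, emitting the diff directly in final order with no key sets, no dict lookups and no sort of the result.
import Mathlib
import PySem

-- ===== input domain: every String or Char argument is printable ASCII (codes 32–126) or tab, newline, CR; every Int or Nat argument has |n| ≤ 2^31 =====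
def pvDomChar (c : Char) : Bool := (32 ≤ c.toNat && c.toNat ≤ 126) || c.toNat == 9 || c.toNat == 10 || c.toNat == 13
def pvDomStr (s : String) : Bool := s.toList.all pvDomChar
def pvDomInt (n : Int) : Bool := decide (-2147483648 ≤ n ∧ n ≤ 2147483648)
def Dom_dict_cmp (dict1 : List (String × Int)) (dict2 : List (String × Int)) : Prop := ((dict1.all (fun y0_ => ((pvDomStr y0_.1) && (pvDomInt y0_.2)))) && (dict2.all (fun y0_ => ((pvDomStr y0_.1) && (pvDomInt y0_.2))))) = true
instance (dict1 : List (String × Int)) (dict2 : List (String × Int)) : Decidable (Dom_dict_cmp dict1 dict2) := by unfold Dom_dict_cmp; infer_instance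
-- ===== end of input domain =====

-- B replaces A's key-set partitioning + dict lookups + final stable sort by a sorted-merge
-- join: sort the two item lists once, walk them with two pointers, emit the diff in final
-- order (objective: alternative — a different algorithm of the same asymptotic cost).

-- ===== PORT A =====
-- A iterates Python sets (keys1-keys2, keys2-keys1, keys1&keys2); the port iterates the
-- PySem.Set element lists in their list order, which is exact for the RETURNED value: the
-- final sort by key makes the result independent of the iteration order (the only key ties
-- are the adjacent ('-','+') pair appended together inside the intersection loop).
-- dict1[key]/dict2[key] are ported as getD: every looked-up key comes from that dict's key
-- set, so Python's KeyError is unreachable and the default is never used.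
def dict_cmp (dict1 : List (String × Int)) (dict2 : List (String × Int)) : Bool × (List (String × String × Int)) :=
  let d1 := PySem.Dict.ofList dict1
  let d2 := PySem.Dict.ofList dict2
  let keys1 : PySem.Set String := PySem.Set.ofList d1.keys
  let keys2 : PySem.Set String := PySem.Set.ofList d2.keys
  let data : List (String × String × Int) := []
  let data := (PySem.Set.diff keys1 keys2).foldl
    (fun acc key => acc ++ [("-", key, d1.getD key 0)]) data
  let data := (PySem.Set.diff keys2 keys1).foldl
    (fun acc key => acc ++ [("+", key, d2.getD key 0)]) data
  let data := (PySem.Set.inter keys1 keys2).foldl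
    (fun acc key =>
      if d1.getD key 0 ≠ d2.getD key 0 then
        acc ++ [("-", key, d1.getD key 0)] ++ [("+", key, d2.getD key 0)]
      else
        acc ++ [(" ", key, d1.getD key 0)]) data
  let data := PySem.List.sorted data (fun t => t.2.1) false
  (!(data.any (fun t => t.1 != " ")), data)

-- ===== PORT B =====
-- Source B's two-pointer merge of the two key-sorted item lists (the three while loops:
-- both lists live, then each drain loop as the map over the leftover suffix).
def pvMergeDiff : List (String × Int) → List (String × Int) → List (String × String × Int)
  | [], l2 => l2.map (fun p => ("+", p.1, p.2))
  | p :: t1, [] => (p :: t1).map (fun q => ("-", q.1, q.2))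
  | (k1, v1) :: t1, (k2, v2) :: t2 =>
      if k1 < k2 then ("-", k1, v1) :: pvMergeDiff t1 ((k2, v2) :: t2)
      else if k2 < k1 then ("+", k2, v2) :: pvMergeDiff ((k1, v1) :: t1) t2
      else if v1 = v2 then (" ", k1, v1) :: pvMergeDiff t1 t2
      else ("-", k1, v1) :: ("+", k2, v2) :: pvMergeDiff t1 t2
termination_by l1 l2 => l1.length + l2.length

def dict_cmp_alt (dict1 : List (String × Int)) (dict2 : List (String × Int)) : Bool × (List (String × String × Int)) :=
  let d1 := PySem.Dict.ofList dict1
  let d2 := PySem.Dict.ofList dict2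
  let items1 := PySem.List.sorted d1.items (fun kv => kv.1) false
  let items2 := PySem.List.sorted d2.items (fun kv => kv.1) false
  let data := pvMergeDiff items1 items2
  (data.all (fun t => t.1 == " "), data)

-- ===== PRECONDITION & SPEC =====
def Spec_dict_cmp (dict1 : List (String × Int)) (dict2 : List (String × Int)) (out : Bool × (List (String × String × Int))) : Prop := out = dict_cmp_alt dict1 dict2
instance (dict1 : List (String × Int)) (dict2 : List (String × Int)) (out : Bool × (List (String × String × Int))) : Decidable (Spec_dict_cmp dict1 dict2 out) := by unfold Spec_dict_cmp; infer_instance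

-- ===== CLAIM (what is proved, stated in full; the proofs are below) =====
def Claim_equal_dict_cmp : Prop := ∀ (dict1 : List (String × Int)) (dict2 : List (String × Int)), Dom_dict_cmp dict1 dict2 → Spec_dict_cmp dict1 dict2 (dict_cmp dict1 dict2)

-- ===== LEMMAS AND PROOFS =====

-- the entries the diff carries for one key (the common description both proofs meet in)
def pvBlock (d1 d2 : PySem.Dict String Int) (key : String) : List (String × String × Int) :=
  let in1 := d1.contains key
  let in2 := d2.contains key
  if !in2 then [("-", key, d1.getD key 0)]
  else if !in1 then [("+", key, d2.getD key 0)]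
  else if d1.getD key 0 = d2.getD key 0 then [(" ", key, d1.getD key 0)]
  else [("-", key, d1.getD key 0), ("+", key, d2.getD key 0)]

-- proof-side skeleton of B's merge: the merged key sequence
def pvKeyMerge : List String → List String → List String
  | [], s2 => s2
  | a :: t1, [] => a :: t1
  | a :: t1, b :: t2 =>
      if a < b then a :: pvKeyMerge t1 (b :: t2)
      else if b < a then b :: pvKeyMerge (a :: t1) t2
      else a :: pvKeyMerge t1 t2
termination_by s1 s2 => s1.length + s2.length

theorem pv_keyMerge_mem (s1 s2 : List String) (x : String) :
    x ∈ pvKeyMerge s1 s2 ↔ x ∈ s1 ∨ x ∈ s2 := by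
  fun_induction pvKeyMerge s1 s2 with
  | case1 s2 => simp
  | case2 a t1 => simp
  | case3 a t1 b t2 hab ih => simp only [List.mem_cons, ih, List.mem_cons]; tauto
  | case4 a t1 b t2 hab hba ih => simp only [List.mem_cons, ih, List.mem_cons]; tauto
  | case5 a t1 b t2 hab hba ih =>
      have hae : a = b := le_antisymm (not_lt.1 hba) (not_lt.1 hab)
      subst hae
      simp only [List.mem_cons, ih]
      tauto

theorem pv_keyMerge_pairwise (s1 s2 : List String)
    (h1 : s1.Pairwise (· < ·)) (h2 : s2.Pairwise (· < ·)) :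
    (pvKeyMerge s1 s2).Pairwise (· < ·) := by
  fun_induction pvKeyMerge s1 s2 with
  | case1 s2 => exact h2
  | case2 a t1 => exact h1
  | case3 a t1 b t2 hab ih =>
      rw [List.pairwise_cons]
      refine ⟨fun x hx => ?_, ih (List.pairwise_cons.1 h1).2 h2⟩
      rcases (pv_keyMerge_mem _ _ _).1 hx with hx | hx
      · exact (List.pairwise_cons.1 h1).1 x hx
      · rcases List.mem_cons.1 hx with rfl | hx
        · exact hab
        · exact lt_trans hab ((List.pairwise_cons.1 h2).1 x hx)
  | case4 a t1 b t2 hab hba ih =>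
      rw [List.pairwise_cons]
      refine ⟨fun x hx => ?_, ih h1 (List.pairwise_cons.1 h2).2⟩
      rcases (pv_keyMerge_mem _ _ _).1 hx with hx | hx
      · rcases List.mem_cons.1 hx with rfl | hx
        · exact hba
        · exact lt_trans hba ((List.pairwise_cons.1 h1).1 x hx)
      · exact (List.pairwise_cons.1 h2).1 x hx
  | case5 a t1 b t2 hab hba ih =>
      have hae : a = b := le_antisymm (not_lt.1 hba) (not_lt.1 hab)
      rw [List.pairwise_cons]
      refine ⟨fun x hx => ?_, ih (List.pairwise_cons.1 h1).2 (List.pairwise_cons.1 h2).2⟩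
      rcases (pv_keyMerge_mem _ _ _).1 hx with hx | hx
      · exact (List.pairwise_cons.1 h1).1 x hx
      · exact hae ▸ (List.pairwise_cons.1 h2).1 x hx

theorem pv_keyMerge_nodup (s1 s2 : List String)
    (h1 : s1.Pairwise (· < ·)) (h2 : s2.Pairwise (· < ·)) :
    (pvKeyMerge s1 s2).Nodup :=
  (pv_keyMerge_pairwise s1 s2 h1 h2).imp (fun h => ne_of_lt h)

-- draining one exhausted side of the merge
theorem pv_drain_plus (d1 d2 : PySem.Dict String Int) (l2 : List (String × Int))
    (hv : ∀ p ∈ l2, d2.getD p.1 0 = p.2) (hc : ∀ p ∈ l2, d2.contains p.1 = true)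
    (hn : ∀ p ∈ l2, d1.contains p.1 = false) :
    l2.map (fun p => (("+" : String), p.1, p.2)) = (l2.map Prod.fst).flatMap (pvBlock d1 d2) := by
  induction l2 with
  | nil => rfl
  | cons p t ih =>
      simp only [List.map_cons, List.flatMap_cons]
      rw [← ih (fun q hq => hv q (by simp [hq])) (fun q hq => hc q (by simp [hq]))
            (fun q hq => hn q (by simp [hq]))]
      have h1 := hn p (by simp)
      have h2 := hc p (by simp)
      have h3 := hv p (by simp)
      simp [pvBlock, h1, h2, h3]

theorem pv_drain_minus (d1 d2 : PySem.Dict String Int) (l1 : List (String × Int))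
    (hv : ∀ p ∈ l1, d1.getD p.1 0 = p.2) (hc : ∀ p ∈ l1, d1.contains p.1 = true)
    (hn : ∀ p ∈ l1, d2.contains p.1 = false) :
    l1.map (fun p => (("-" : String), p.1, p.2)) = (l1.map Prod.fst).flatMap (pvBlock d1 d2) := by
  induction l1 with
  | nil => rfl
  | cons p t ih =>
      simp only [List.map_cons, List.flatMap_cons]
      rw [← ih (fun q hq => hv q (by simp [hq])) (fun q hq => hc q (by simp [hq]))
            (fun q hq => hn q (by simp [hq]))]
      have h1 := hn p (by simp)
      have h3 := hv p (by simp)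
      simp [pvBlock, h1, h3]

-- B's merge over key-sorted item lists produces the per-key blocks in merged key order
theorem pv_merge_eq (d1 d2 : PySem.Dict String Int) (l1 l2 : List (String × Int)) :
    (l1.map Prod.fst).Pairwise (· < ·) → (l2.map Prod.fst).Pairwise (· < ·) →
    (∀ p ∈ l1, d1.getD p.1 0 = p.2) → (∀ p ∈ l2, d2.getD p.1 0 = p.2) →
    (∀ p ∈ l1, d1.contains p.1 = true) → (∀ p ∈ l2, d2.contains p.1 = true) →
    (∀ p ∈ l1, d2.contains p.1 = true → p.1 ∈ l2.map Prod.fst) →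
    (∀ p ∈ l2, d1.contains p.1 = true → p.1 ∈ l1.map Prod.fst) →
    pvMergeDiff l1 l2 = (pvKeyMerge (l1.map Prod.fst) (l2.map Prod.fst)).flatMap (pvBlock d1 d2) := by
  fun_induction pvMergeDiff l1 l2 with
  | case1 l2 =>
      intro _ _ _ hv2 _ hc2 _ hx21
      rw [show pvKeyMerge (List.map Prod.fst ([] : List (String × Int))) (l2.map Prod.fst)
            = l2.map Prod.fst from by simp [pvKeyMerge]]
      exact pv_drain_plus d1 d2 l2 hv2 hc2 (fun p hp => by
        cases h : d1.contains p.1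
        · rfl
        · exact absurd (hx21 p hp h) (List.not_mem_nil))
  | case2 p t1 =>
      intro _ _ hv1 _ hc1 _ hx12 _
      rw [show pvKeyMerge ((p :: t1).map Prod.fst) (List.map Prod.fst ([] : List (String × Int)))
            = (p :: t1).map Prod.fst from by simp [pvKeyMerge]]
      exact pv_drain_minus d1 d2 (p :: t1) hv1 hc1 (fun q hq => by
        cases h : d2.contains q.1
        · rfl
        · exact absurd (hx12 q hq h) (List.not_mem_nil))
  | case3 k1 v1 t1 k2 v2 t2 hlt ih =>
      intro hp1 hp2 hv1 hv2 hc1 hc2 hx12 hx21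
      have hnot2 : d2.contains k1 = false := by
        cases h : d2.contains k1
        · rfl
        · exfalso
          have := hx12 (k1, v1) (by simp) h
          simp only [List.map_cons] at this
          rcases List.mem_cons.1 this with he | hm
          · exact absurd he (ne_of_lt hlt)
          · exact absurd rfl (ne_of_lt (lt_trans hlt ((List.pairwise_cons.1 hp2).1 k1 hm)))
      have hblock : pvBlock d1 d2 k1 = [("-", k1, v1)] := by
        have h3 := hv1 (k1, v1) (by simp)
        simp [pvBlock, hnot2, h3]
      simp only [List.map_cons, pvKeyMerge, if_pos hlt, List.flatMap_cons, hblock]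
      rw [ih ((List.pairwise_cons.1 hp1).2) hp2
            (fun q hq => hv1 q (by simp [hq])) hv2
            (fun q hq => hc1 q (by simp [hq])) hc2
            (fun q hq h => hx12 q (by simp [hq]) h)
            (fun q hq h => by
              have := hx21 q hq h
              simp only [List.map_cons] at this
              rcases List.mem_cons.1 this with he | hm
              · exfalso
                have hq2 : k2 ≤ q.1 := by
                  rcases List.mem_cons.1 hq with rfl | hm2
                  · exact le_refl _
                  · exact le_of_lt ((List.pairwise_cons.1 hp2).1 q.1 (List.mem_map_of_mem hm2))
                exact absurd (he ▸ lt_of_lt_of_le hlt hq2) (lt_irrefl _)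
              · exact hm)]
      rfl
  | case4 k1 v1 t1 k2 v2 t2 hlt hgt ih =>
      intro hp1 hp2 hv1 hv2 hc1 hc2 hx12 hx21
      have hnot1 : d1.contains k2 = false := by
        cases h : d1.contains k2
        · rfl
        · exfalso
          have := hx21 (k2, v2) (by simp) h
          simp only [List.map_cons] at this
          rcases List.mem_cons.1 this with he | hm
          · exact absurd he (ne_of_lt hgt)
          · exact absurd rfl (ne_of_lt (lt_trans hgt ((List.pairwise_cons.1 hp1).1 k2 hm)))
      have hc2' := hc2 (k2, v2) (by simp)
      have hblock : pvBlock d1 d2 k2 = [("+", k2, v2)] := by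
        have h3 := hv2 (k2, v2) (by simp)
        simp [pvBlock, hnot1, hc2', h3]
      simp only [List.map_cons, pvKeyMerge, if_neg hlt, if_pos hgt, List.flatMap_cons, hblock]
      rw [ih hp1 ((List.pairwise_cons.1 hp2).2)
            hv1 (fun q hq => hv2 q (by simp [hq]))
            hc1 (fun q hq => hc2 q (by simp [hq]))
            (fun q hq h => by
              have := hx12 q hq h
              simp only [List.map_cons] at this
              rcases List.mem_cons.1 this with he | hm
              · exfalso
                have hq1 : k1 ≤ q.1 := by
                  rcases List.mem_cons.1 hq with rfl | hm2
                  · exact le_refl _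
                  · exact le_of_lt ((List.pairwise_cons.1 hp1).1 q.1 (List.mem_map_of_mem hm2))
                exact absurd (he ▸ lt_of_lt_of_le hgt hq1) (lt_irrefl _)
              · exact hm)
            (fun q hq h => hx21 q (by simp [hq]) h)]
      rfl
  | case5 k1 t1 k2 v2 t2 hlt hgt ih =>
      intro hp1 hp2 hv1 hv2 hc1 hc2 hx12 hx21
      have hke : k1 = k2 := le_antisymm (not_lt.1 hgt) (not_lt.1 hlt)
      have hc1' := hc1 (k1, v2) (by simp)
      have hc2' : d2.contains k1 = true := by
        rw [hke]; exact hc2 (k2, v2) (by simp)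
      have hg1 := hv1 (k1, v2) (by simp)
      have hg2 : d2.getD k1 0 = v2 := by
        rw [hke]; exact hv2 (k2, v2) (by simp)
      have hblock : pvBlock d1 d2 k1 = [(" ", k1, v2)] := by
        simp [pvBlock, hc1', hc2', hg1, hg2]
      simp only [List.map_cons, pvKeyMerge, if_neg hlt, if_neg hgt, List.flatMap_cons, hblock]
      rw [ih ((List.pairwise_cons.1 hp1).2)
            ((List.pairwise_cons.1 hp2).2)
            (fun q hq => hv1 q (by simp [hq])) (fun q hq => hv2 q (by simp [hq]))
            (fun q hq => hc1 q (by simp [hq])) (fun q hq => hc2 q (by simp [hq]))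
            (fun q hq h => by
              have := hx12 q (by simp [hq]) h
              simp only [List.map_cons] at this
              rcases List.mem_cons.1 this with he | hm
              · exact absurd (show k1 < k2 from he ▸ (List.pairwise_cons.1 hp1).1 q.1
                  (List.mem_map_of_mem hq)) hlt
              · exact hm)
            (fun q hq h => by
              have := hx21 q (by simp [hq]) h
              simp only [List.map_cons] at this
              rcases List.mem_cons.1 this with he | hm
              · exact absurd (show k2 < k1 from he ▸ (List.pairwise_cons.1 hp2).1 q.1
                  (List.mem_map_of_mem hq)) hgt
              · exact hm)]
      rfl
  | case6 k1 v1 t1 k2 v2 t2 hlt hgt hvne ih =>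
      intro hp1 hp2 hv1 hv2 hc1 hc2 hx12 hx21
      have hke : k1 = k2 := le_antisymm (not_lt.1 hgt) (not_lt.1 hlt)
      have hc1' := hc1 (k1, v1) (by simp)
      have hc2' : d2.contains k1 = true := by
        rw [hke]; exact hc2 (k2, v2) (by simp)
      have hg1 := hv1 (k1, v1) (by simp)
      have hg2 : d2.getD k1 0 = v2 := by
        rw [hke]; exact hv2 (k2, v2) (by simp)
      have hblock : pvBlock d1 d2 k1 = [("-", k1, v1), ("+", k1, v2)] := by
        simp [pvBlock, hc1', hc2', hg1, hg2, hvne]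
      simp only [List.map_cons, pvKeyMerge, if_neg hlt, if_neg hgt, List.flatMap_cons, hblock]
      rw [ih ((List.pairwise_cons.1 hp1).2)
            ((List.pairwise_cons.1 hp2).2)
            (fun q hq => hv1 q (by simp [hq])) (fun q hq => hv2 q (by simp [hq]))
            (fun q hq => hc1 q (by simp [hq])) (fun q hq => hc2 q (by simp [hq]))
            (fun q hq h => by
              have := hx12 q (by simp [hq]) h
              simp only [List.map_cons] at this
              rcases List.mem_cons.1 this with he | hm
              · exact absurd (show k1 < k2 from he ▸ (List.pairwise_cons.1 hp1).1 q.1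
                  (List.mem_map_of_mem hq)) hlt
              · exact hm)
            (fun q hq h => by
              have := hx21 q (by simp [hq]) h
              simp only [List.map_cons] at this
              rcases List.mem_cons.1 this with he | hm
              · exact absurd (show k2 < k1 from he ▸ (List.pairwise_cons.1 hp2).1 q.1
                  (List.mem_map_of_mem hq)) hgt
              · exact hm)]
      rw [hke]
      rfl

theorem pv_flatMap_congr {α β : Type} (l : List α) (f g : α → List β)
    (h : ∀ a ∈ l, f a = g a) : l.flatMap f = l.flatMap g := by
  induction l with
  | nil => rfl
  | cons a l ih => simp [List.flatMap_cons, h a (by simp), ih (fun t ht => h t (by simp [ht]))]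

-- insertBy unfolding
theorem pv_insertBy_cons {α : Type} (b : α → α → Bool) (x y : α) (ys : List α) :
    PySem.List.insertBy b x (y :: ys) =
      if b x y then x :: y :: ys else y :: PySem.List.insertBy b x ys := by
  simp [PySem.List.insertBy]

-- insertion passes a prefix it does not go before
theorem pv_insertBy_prefix {α : Type} (b : α → α → Bool) (x : α) (pre acc : List α)
    (h : ∀ y ∈ pre, b x y = false) :
    PySem.List.insertBy b x (pre ++ acc) = pre ++ PySem.List.insertBy b x acc := by
  induction pre with
  | nil => rfl
  | cons y pre ih =>
      have hy : b x y = false := h y (by simp)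
      simp only [List.cons_append, pv_insertBy_cons, hy, Bool.false_eq_true, if_false]
      rw [ih (fun z hz => h z (by simp [hz]))]

-- insertion goes to the front of a suffix it goes before
theorem pv_insertBy_front {α : Type} (b : α → α → Bool) (x : α) (zs : List α)
    (h : ∀ z ∈ zs, b x z = true) :
    PySem.List.insertBy b x zs = x :: zs := by
  cases zs with
  | nil => rfl
  | cons z zs => rw [pv_insertBy_cons, h z (by simp)]; simp

-- folding a tie-free block of equal-key elements between a passed prefix and a strictly
-- greater suffix places the block, in order, between them (the stability argument)
theorem pv_foldl_ins_block {α : Type} (b : α → α → Bool) (bl : List α) :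
    ∀ (ys zs : List α),
    (∀ x ∈ bl, ∀ y ∈ ys, b x y = false) →
    (∀ x ∈ bl, ∀ y ∈ bl, b x y = false) →
    (∀ x ∈ bl, ∀ z ∈ zs, b x z = true) →
    bl.foldl (fun acc x => PySem.List.insertBy b x acc) (ys ++ zs) = ys ++ bl ++ zs := by
  induction bl with
  | nil => intro ys zs _ _ _; simp
  | cons x bl ih =>
      intro ys zs h1 hb h2
      have hx : PySem.List.insertBy b x (ys ++ zs) = ys ++ x :: zs := by
        rw [pv_insertBy_prefix b x ys zs (h1 x (List.mem_cons_self ..)),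
            pv_insertBy_front b x zs (h2 x (List.mem_cons_self ..))]
      have hmain := ih (ys ++ [x]) zs
        (fun t ht y hy => by
          rcases List.mem_append.1 hy with hy | hy
          · exact h1 t (List.mem_cons_of_mem x ht) y hy
          · rw [List.mem_singleton.1 hy]
            exact hb t (List.mem_cons_of_mem x ht) x (List.mem_cons_self ..))
        (fun t ht y hy => hb t (List.mem_cons_of_mem x ht) y (List.mem_cons_of_mem x hy))
        (fun t ht z hz => h2 t (List.mem_cons_of_mem x ht) z hz)
      simp only [List.foldl_cons, hx]
      rw [show ys ++ x :: zs = (ys ++ [x]) ++ zs by simp, hmain]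
      simp

-- folding past a prefix none of the block goes before
theorem pv_foldl_ins_prefix {α : Type} (b : α → α → Bool) (bl : List α) :
    ∀ (pre acc : List α), (∀ x ∈ bl, ∀ y ∈ pre, b x y = false) →
    bl.foldl (fun acc x => PySem.List.insertBy b x acc) (pre ++ acc) =
      pre ++ bl.foldl (fun acc x => PySem.List.insertBy b x acc) acc := by
  induction bl with
  | nil => intro pre acc _; simp
  | cons x bl ih =>
      intro pre acc h
      simp only [List.foldl_cons]
      rw [pv_insertBy_prefix b x pre acc (h x (by simp))]
      exact ih pre _ (fun t ht y hy => h t (by simp [ht]) y hy)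

-- inserting one key's whole block into a strictly key-increasing blockwise list
theorem pv_ins_block_flatMap (S : List String) :
    ∀ (B : String → List (String × String × Int)),
    S.Pairwise (· < ·) →
    (∀ j ∈ S, ∀ t ∈ B j, t.2.1 = j) →
    ∀ (k : String), k ∉ S →
    ∀ (bl : List (String × String × Int)), (∀ x ∈ bl, x.2.1 = k) →
    bl.foldl (fun acc x => PySem.List.insertBy (fun a b => decide (a.2.1 < b.2.1)) x acc)
        (S.flatMap B) =
      (PySem.List.insertBy (fun a b => decide (a < b)) k S).flatMap
        (fun j => if j = k then bl else B j) := by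
  induction S with
  | nil =>
      intro B _ _ k _ bl hbl
      have h := pv_foldl_ins_block (fun a b => decide (a.2.1 < b.2.1)) bl [] []
        (by simp)
        (fun x hx y hy => by
          show decide (x.2.1 < y.2.1) = false
          rw [hbl x hx, hbl y hy]; exact decide_eq_false (lt_irrefl k))
        (by simp)
      simpa [PySem.List.insertBy] using h
  | cons j S ih =>
      intro B hS hB k hk bl hbl
      have hkj : k ≠ j := fun h => hk (h ▸ List.mem_cons_self ..)
      by_cases hlt : k < j
      · -- whole list is strictly greater: the block goes to the front
        have hgt : ∀ z ∈ (j :: S).flatMap B, k < z.2.1 := by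
          intro z hz
          rcases List.mem_flatMap.1 hz with ⟨j', hj', hzj⟩
          have hz1 : z.2.1 = j' := hB j' hj' z hzj
          rcases List.mem_cons.1 hj' with h | h
          · subst h; rw [hz1]; exact hlt
          · rw [hz1]; exact lt_trans hlt ((List.pairwise_cons.1 hS).1 j' h)
        have hmain := pv_foldl_ins_block (fun a b => decide (a.2.1 < b.2.1)) bl []
          ((j :: S).flatMap B) (by simp)
          (fun x hx y hy => by
            show decide (x.2.1 < y.2.1) = false
            rw [hbl x hx, hbl y hy]; exact decide_eq_false (lt_irrefl k))
          (fun x hx z hz => by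
            show decide (x.2.1 < z.2.1) = true
            rw [hbl x hx]; exact decide_eq_true (hgt z hz))
        simp only [List.nil_append] at hmain
        rw [hmain, pv_insertBy_front (fun a b => decide (a < b)) k (j :: S)
              (by intro z hz
                  rcases List.mem_cons.1 hz with h | h
                  · exact h ▸ decide_eq_true hlt
                  · exact decide_eq_true (lt_trans hlt ((List.pairwise_cons.1 hS).1 z h)))]
        have hifk : (if k = k then bl else B k) = bl := if_pos rfl
        conv_rhs => rw [List.flatMap_cons]
        rw [hifk]
        congr 1
        exact pv_flatMap_congr (j :: S) B _ (fun a ha => by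
          have hak : a ≠ k := fun h => hk (h ▸ ha)
          rw [if_neg hak])
      · -- j < k: the head block is passed unchanged
        have hjk : j < k := lt_of_le_of_ne (not_lt.1 hlt) (fun h => hkj h.symm)
        simp only [List.flatMap_cons]
        rw [pv_foldl_ins_prefix _ bl (B j) (S.flatMap B)
              (fun x hx y hy => by
                show decide (x.2.1 < y.2.1) = false
                rw [hbl x hx, hB j (List.mem_cons_self ..) y hy]
                exact decide_eq_false (not_lt.2 (le_of_lt hjk))),
            ih B (List.pairwise_cons.1 hS).2
              (fun j' hj' t ht => hB j' (List.mem_cons_of_mem j hj') t ht) k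
              (fun h => hk (List.mem_cons_of_mem j h)) bl hbl,
            pv_insertBy_cons, if_neg (by simp only [decide_eq_true_eq]; exact hlt)]
        rw [List.flatMap_cons, if_neg hkj.symm]

-- sorting a blockwise list over pairwise-distinct keys = blocks in sorted key order
theorem pv_sorted_flatMap (L : List String) (B : String → List (String × String × Int))
    (hL : L.Nodup) (hB : ∀ j ∈ L, ∀ t ∈ B j, t.2.1 = j) :
    PySem.List.sorted (L.flatMap B) (fun t => t.2.1) false =
      (PySem.List.sorted L (fun x => x) false).flatMap B := by
  induction L using List.reverseRecOn with
  | nil => rfl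
  | append_singleton L k ih =>
      have hcomm := List.nodup_append_comm.mp hL
      have hL' : L.Nodup := (List.nodup_cons.1 hcomm).2
      have hkL : k ∉ L := (List.nodup_cons.1 hcomm).1
      have hSnodup : (PySem.List.sorted L (fun x => x) false).Nodup :=
        (PySem.List.sorted_perm L (fun x => x) false).nodup_iff.2 hL'
      have hSpair : (PySem.List.sorted L (fun x => x) false).Pairwise (· < ·) := by
        have h1 := PySem.List.sorted_pairwise L (fun x => x)
        have := h1.and hSnodup
        exact this.imp (fun {a b} h => lt_of_le_of_ne h.1 h.2)
      have hkS : k ∉ PySem.List.sorted L (fun x => x) false := by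
        intro h
        exact hkL ((PySem.List.sorted_perm L (fun x => x) false).mem_iff.1 h)
      rw [PySem.List.sorted_eq_foldl_insertBy, List.flatMap_append, List.foldl_append,
          ← PySem.List.sorted_eq_foldl_insertBy,
          ih hL' (fun j hj t ht => hB j (by simp [hj]) t ht)]
      simp only [List.flatMap_cons, List.flatMap_nil, List.append_nil]
      rw [pv_ins_block_flatMap (PySem.List.sorted L (fun x => x) false) B hSpair
            (fun j hj t ht =>
              hB j (by simp [(PySem.List.sorted_perm L (fun x => x) false).mem_iff.1 hj]) t ht)
            k hkS (B k) (fun t ht => hB k (by simp) t ht),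
          pv_flatMap_congr _ _ B (fun a _ => by by_cases h : a = k <;> simp [h])]
      congr 1
      rw [PySem.List.sorted_eq_foldl_insertBy (L ++ [k]) (fun x => x), List.foldl_append,
          ← PySem.List.sorted_eq_foldl_insertBy]
      rfl

theorem pv_block_key (d1 d2 : PySem.Dict String Int) (j : String) :
    ∀ t ∈ pvBlock d1 d2 j, t.2.1 = j := by
  intro t ht
  unfold pvBlock at ht
  dsimp only at ht
  split_ifs at ht <;>
    simp only [List.mem_cons, List.not_mem_nil, or_false] at ht <;>
    first
      | (obtain rfl := ht; rfl)
      | (rcases ht with rfl | rfl <;> rfl)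

-- the data list A sorts equals the per-key blocks over the sorted key union
theorem pv_core (d1 d2 : PySem.Dict String Int) (h1 : d1.keys.Nodup) (h2 : d2.keys.Nodup) :
    PySem.List.sorted
      ((PySem.Set.inter (PySem.Set.ofList d1.keys) (PySem.Set.ofList d2.keys)).foldl
        (fun acc key =>
          if d1.getD key 0 ≠ d2.getD key 0 then
            acc ++ [("-", key, d1.getD key 0)] ++ [("+", key, d2.getD key 0)]
          else acc ++ [(" ", key, d1.getD key 0)])
        ((PySem.Set.diff (PySem.Set.ofList d2.keys) (PySem.Set.ofList d1.keys)).foldl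
          (fun acc key => acc ++ [("+", key, d2.getD key 0)])
          ((PySem.Set.diff (PySem.Set.ofList d1.keys) (PySem.Set.ofList d2.keys)).foldl
            (fun acc key => acc ++ [("-", key, d1.getD key 0)]) [])))
      (fun t => t.2.1) false
  = (PySem.List.sorted
      (PySem.Set.union (PySem.Set.ofList d1.keys) (PySem.Set.ofList d2.keys))
      (fun k => k) false).flatMap (pvBlock d1 d2) := by
  rw [PySem.Set.ofList_eq_self_of_nodup _ h1, PySem.Set.ofList_eq_self_of_nodup _ h2]
  have hb3 : (fun (acc : List (String × String × Int)) key =>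
      if d1.getD key 0 ≠ d2.getD key 0 then
        acc ++ [("-", key, d1.getD key 0)] ++ [("+", key, d2.getD key 0)]
      else acc ++ [(" ", key, d1.getD key 0)]) =
      (fun acc key => acc ++
        (if d1.getD key 0 = d2.getD key 0 then [(" ", key, d1.getD key 0)]
         else [("-", key, d1.getD key 0), ("+", key, d2.getD key 0)])) := by
    funext acc key
    by_cases h : d1.getD key 0 = d2.getD key 0 <;> simp [h]
  rw [hb3, PySem.List.foldl_append_eq_flatMap, PySem.List.foldl_append_eq_flatMap,
      PySem.List.foldl_append_eq_flatMap]
  simp only [List.nil_append]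
  have hm : List.flatMap (fun key => [(("-" : String), key, d1.getD key 0)])
      (PySem.Set.diff d1.keys d2.keys) = List.flatMap (pvBlock d1 d2) (PySem.Set.diff d1.keys d2.keys) :=
    pv_flatMap_congr _ _ _ (fun a ha => by
      rcases (PySem.Set.mem_diff _ _ _).1 ha with ⟨hin, hout⟩
      simp [pvBlock, PySem.Dict.contains_eq_decide_mem_keys, hout])
  have hp : List.flatMap (fun key => [(("+" : String), key, d2.getD key 0)])
      (PySem.Set.diff d2.keys d1.keys) = List.flatMap (pvBlock d1 d2) (PySem.Set.diff d2.keys d1.keys) :=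
    pv_flatMap_congr _ _ _ (fun a ha => by
      rcases (PySem.Set.mem_diff _ _ _).1 ha with ⟨hin, hout⟩
      simp [pvBlock, PySem.Dict.contains_eq_decide_mem_keys, hin, hout])
  have hi : List.flatMap (fun key =>
        if d1.getD key 0 = d2.getD key 0 then [((" " : String), key, d1.getD key 0)]
        else [("-", key, d1.getD key 0), ("+", key, d2.getD key 0)])
      (PySem.Set.inter d1.keys d2.keys) = List.flatMap (pvBlock d1 d2) (PySem.Set.inter d1.keys d2.keys) :=
    pv_flatMap_congr _ _ _ (fun a ha => by
      rcases (PySem.Set.mem_inter _ _ _).1 ha with ⟨hin1, hin2⟩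
      simp [pvBlock, PySem.Dict.contains_eq_decide_mem_keys, hin1, hin2])
  rw [hm, hp, hi, ← List.flatMap_append, ← List.flatMap_append]
  have nd12 := PySem.Set.nodup_diff d1.keys d2.keys h1
  have nd21 := PySem.Set.nodup_diff d2.keys d1.keys h2
  have ndI := PySem.Set.nodup_inter d1.keys d2.keys h1
  have ndU := PySem.Set.nodup_union d1.keys d2.keys h1
  have hndL : ((PySem.Set.diff d1.keys d2.keys ++ PySem.Set.diff d2.keys d1.keys) ++
      PySem.Set.inter d1.keys d2.keys).Nodup := by
    rw [List.nodup_append]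
    refine ⟨?_, ndI, ?_⟩
    · rw [List.nodup_append]
      refine ⟨nd12, nd21, ?_⟩
      intro a ha b hb heq
      subst heq
      exact ((PySem.Set.mem_diff _ _ _).1 hb).2 ((PySem.Set.mem_diff _ _ _).1 ha).1
    · intro a ha b hb heq
      subst heq
      rcases List.mem_append.1 ha with h | h
      · exact ((PySem.Set.mem_diff _ _ _).1 h).2 ((PySem.Set.mem_inter _ _ _).1 hb).2
      · exact ((PySem.Set.mem_diff _ _ _).1 h).2 ((PySem.Set.mem_inter _ _ _).1 hb).1
  have hperm : ((PySem.Set.diff d1.keys d2.keys ++ PySem.Set.diff d2.keys d1.keys) ++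
      PySem.Set.inter d1.keys d2.keys).Perm (PySem.Set.union d1.keys d2.keys) := by
    rw [List.perm_ext_iff_of_nodup hndL ndU]
    intro a
    simp only [List.mem_append, PySem.Set.mem_diff, PySem.Set.mem_inter, PySem.Set.mem_union]
    tauto
  rw [pv_sorted_flatMap _ (pvBlock d1 d2) hndL (fun j _ => pv_block_key d1 d2 j),
      PySem.List.sorted_eq_sorted_of_perm _ _ (fun x => x) (fun _ _ h => h) hperm]

-- identifying A's sorted key union with B's merged key sequence
theorem pv_union_eq_keyMerge (d1 d2 : PySem.Dict String Int)
    (h1 : d1.keys.Nodup) (h2 : d2.keys.Nodup) :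
    PySem.List.sorted (PySem.Set.union d1.keys d2.keys) (fun k => k) false
      = pvKeyMerge ((PySem.List.sorted d1.items (fun kv => kv.1) false).map Prod.fst)
                   ((PySem.List.sorted d2.items (fun kv => kv.1) false).map Prod.fst) := by
  have hperm1 : ((PySem.List.sorted d1.items (fun kv => kv.1) false).map Prod.fst).Perm d1.keys :=
    (PySem.List.sorted_perm d1.items (fun kv => kv.1) false).map Prod.fst
  have hperm2 : ((PySem.List.sorted d2.items (fun kv => kv.1) false).map Prod.fst).Perm d2.keys :=
    (PySem.List.sorted_perm d2.items (fun kv => kv.1) false).map Prod.fst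
  have hnd1 : ((PySem.List.sorted d1.items (fun kv => kv.1) false).map Prod.fst).Nodup :=
    hperm1.nodup_iff.2 h1
  have hnd2 : ((PySem.List.sorted d2.items (fun kv => kv.1) false).map Prod.fst).Nodup :=
    hperm2.nodup_iff.2 h2
  have hp1 : ((PySem.List.sorted d1.items (fun kv => kv.1) false).map Prod.fst).Pairwise (· < ·) := by
    have hle : ((PySem.List.sorted d1.items (fun kv => kv.1) false).map Prod.fst).Pairwise (· ≤ ·) :=
      List.pairwise_map.2 (PySem.List.sorted_pairwise d1.items (fun kv => kv.1))
    exact (hle.and hnd1).imp (fun {a b} h => lt_of_le_of_ne h.1 h.2)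
  have hp2 : ((PySem.List.sorted d2.items (fun kv => kv.1) false).map Prod.fst).Pairwise (· < ·) := by
    have hle : ((PySem.List.sorted d2.items (fun kv => kv.1) false).map Prod.fst).Pairwise (· ≤ ·) :=
      List.pairwise_map.2 (PySem.List.sorted_pairwise d2.items (fun kv => kv.1))
    exact (hle.and hnd2).imp (fun {a b} h => lt_of_le_of_ne h.1 h.2)
  have hpermU : (pvKeyMerge ((PySem.List.sorted d1.items (fun kv => kv.1) false).map Prod.fst)
      ((PySem.List.sorted d2.items (fun kv => kv.1) false).map Prod.fst)).Perm
      (PySem.Set.union d1.keys d2.keys) := by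
    rw [List.perm_ext_iff_of_nodup (pv_keyMerge_nodup _ _ hp1 hp2)
          (PySem.Set.nodup_union d1.keys d2.keys h1)]
    intro a
    rw [pv_keyMerge_mem, PySem.Set.mem_union, hperm1.mem_iff, hperm2.mem_iff]
  exact PySem.List.sorted_eq_of_perm_of_pairwise_lt _ _ _ hpermU (pv_keyMerge_pairwise _ _ hp1 hp2)

theorem pv_not_any_eq_all (l : List (String × String × Int)) :
    (!(l.any (fun t => t.1 != " "))) = l.all (fun t => t.1 == " ") := by
  induction l with
  | nil => rfl
  | cons t l ih =>
      simp only [bne] at ih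
      simp only [List.any_cons, List.all_cons, Bool.not_or, bne, Bool.not_not, ih]

-- B's data list equals the per-key blocks over the sorted key union
theorem pv_alt_data (d1 d2 : PySem.Dict String Int)
    (h1 : d1.keys.Nodup) (h2 : d2.keys.Nodup) :
    pvMergeDiff (PySem.List.sorted d1.items (fun kv => kv.1) false)
                (PySem.List.sorted d2.items (fun kv => kv.1) false)
      = (PySem.List.sorted (PySem.Set.union d1.keys d2.keys) (fun k => k) false).flatMap
          (pvBlock d1 d2) := by
  rw [pv_union_eq_keyMerge d1 d2 h1 h2]
  have hmem1 : ∀ p ∈ PySem.List.sorted d1.items (fun kv => kv.1) false, p ∈ d1.items :=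
    fun p hp => (PySem.List.sorted_perm d1.items (fun kv => kv.1) false).mem_iff.1 hp
  have hmem2 : ∀ p ∈ PySem.List.sorted d2.items (fun kv => kv.1) false, p ∈ d2.items :=
    fun p hp => (PySem.List.sorted_perm d2.items (fun kv => kv.1) false).mem_iff.1 hp
  have hnd1 : ((PySem.List.sorted d1.items (fun kv => kv.1) false).map Prod.fst).Nodup :=
    ((PySem.List.sorted_perm d1.items (fun kv => kv.1) false).map Prod.fst).nodup_iff.2 h1
  have hnd2 : ((PySem.List.sorted d2.items (fun kv => kv.1) false).map Prod.fst).Nodup :=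
    ((PySem.List.sorted_perm d2.items (fun kv => kv.1) false).map Prod.fst).nodup_iff.2 h2
  refine pv_merge_eq d1 d2 _ _ ?_ ?_ ?_ ?_ ?_ ?_ ?_ ?_
  · exact ((List.pairwise_map.2 (PySem.List.sorted_pairwise d1.items (fun kv => kv.1))).and
      hnd1).imp (fun {a b} h => lt_of_le_of_ne h.1 h.2)
  · exact ((List.pairwise_map.2 (PySem.List.sorted_pairwise d2.items (fun kv => kv.1))).and
      hnd2).imp (fun {a b} h => lt_of_le_of_ne h.1 h.2)
  · exact fun p hp => PySem.Dict.getD_of_mem_items d1 (hmem1 p hp) h1 0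
  · exact fun p hp => PySem.Dict.getD_of_mem_items d2 (hmem2 p hp) h2 0
  · exact fun p hp => (PySem.Dict.contains_iff_mem_keys d1 p.1).2
      (PySem.Dict.mem_keys_of_mem_items d1 (hmem1 p hp))
  · exact fun p hp => (PySem.Dict.contains_iff_mem_keys d2 p.1).2
      (PySem.Dict.mem_keys_of_mem_items d2 (hmem2 p hp))
  · intro p hp h
    have hk : p.1 ∈ d2.keys := (PySem.Dict.contains_iff_mem_keys d2 p.1).1 h
    exact ((PySem.List.sorted_perm d2.items (fun kv => kv.1) false).map Prod.fst).mem_iff.2 hk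
  · intro p hp h
    have hk : p.1 ∈ d1.keys := (PySem.Dict.contains_iff_mem_keys d1 p.1).1 h
    exact ((PySem.List.sorted_perm d1.items (fun kv => kv.1) false).map Prod.fst).mem_iff.2 hk

-- ===== VERDICT (by name: the statement is the Claim_ definition above) =====
theorem dict_cmp_spec : Claim_equal_dict_cmp := by
  intro dict1 dict2 _
  unfold Spec_dict_cmp dict_cmp dict_cmp_alt
  dsimp only
  rw [pv_core (PySem.Dict.ofList dict1) (PySem.Dict.ofList dict2)
        (PySem.Dict.nodup_keys_ofList dict1) (PySem.Dict.nodup_keys_ofList dict2)]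
  rw [PySem.Set.ofList_eq_self_of_nodup _ (PySem.Dict.nodup_keys_ofList dict1),
      PySem.Set.ofList_eq_self_of_nodup _ (PySem.Dict.nodup_keys_ofList dict2),
      ← pv_alt_data (PySem.Dict.ofList dict1) (PySem.Dict.ofList dict2)
        (PySem.Dict.nodup_keys_ofList dict1) (PySem.Dict.nodup_keys_ofList dict2),
      pv_not_any_eq_all]
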